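-- pv_equiv track=rewrite | github.com/HLSDEO/dados_abertos | etl/pipeline/3-siafi.py | _extract_estado
-- ===== SOURCE A (Python) =====
-- _UF_MAP = {
--     "ACRE": "AC", "ALAGOAS": "AL", "AMAPA": "AP", "AMAZONAS": "AM",
--     "BAHIA": "BA", "CEARA": "CE", "DISTRITO FEDERAL": "DF",
--     "ESPIRITO SANTO": "ES", "GOIAS": "GO", "MARANHAO": "MA",
--     "MATO GROSSO": "MT", "MATO GROSSO DO SUL": "MS", "MINAS GERAIS": "MG",
--     "PARA": "PA", "PARAIBA": "PB", "PARANA": "PR", "PERNAMBUCO": "PE",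
--     "PIAUI": "PI", "RIO DE JANEIRO": "RJ", "RIO GRANDE DO NORTE": "RN",
--     "RIO GRANDE DO SUL": "RS", "RONDONIA": "RO", "RORAIMA": "RR",
--     "SANTA CATARINA": "SC", "SAO PAULO": "SP", "SERGIPE": "SE",
--     "TOCANTINS": "TO",
-- }
--
-- def _extract_estado(no_orgao: str, no_esfera: str) -> tuple[str, str]:
--     """
--     Extrai (nome_estado, sigla_uf) de NO_ORGAO quando esfera = ESTADUAL.
--     Retorna ("", "") quando não reconhecido.
--     """
--     if no_esfera != "ESTADUAL":
--         return "", ""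
--     s = no_orgao.strip().upper()
--     for prefix in ("ESTADO DE ", "ESTADO DO ", "ESTADO DA ", "GOVERNO DO ESTADO DE ",
--                    "GOVERNO DO ESTADO DO ", "GOVERNO DO ESTADO DA ", "ESTADO "):
--         if s.startswith(prefix):
--             nome = s[len(prefix):]
--             return nome, _UF_MAP.get(nome, "")
--     # fallback: tenta o nome inteiro
--     return s, _UF_MAP.get(s, "")
-- ===== SOURCE B (Python) =====
-- _UF_MAP = {
--     "ACRE": "AC", "ALAGOAS": "AL", "AMAPA": "AP", "AMAZONAS": "AM",
--     "BAHIA": "BA", "CEARA": "CE", "DISTRITO FEDERAL": "DF",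
--     "ESPIRITO SANTO": "ES", "GOIAS": "GO", "MARANHAO": "MA",
--     "MATO GROSSO": "MT", "MATO GROSSO DO SUL": "MS", "MINAS GERAIS": "MG",
--     "PARA": "PA", "PARAIBA": "PB", "PARANA": "PR", "PERNAMBUCO": "PE",
--     "PIAUI": "PI", "RIO DE JANEIRO": "RJ", "RIO GRANDE DO NORTE": "RN",
--     "RIO GRANDE DO SUL": "RS", "RONDONIA": "RO", "RORAIMA": "RR",
--     "SANTA CATARINA": "SC", "SAO PAULO": "SP", "SERGIPE": "SE",
--     "TOCANTINS": "TO",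
-- }
--
--
-- def _extract_estado(no_orgao: str, no_esfera: str) -> tuple[str, str]:
--     """Same result as the prefix-loop version, by factoring the shared stems:
--     a name is 'GOVERNO DO ESTADO ' + D[EOA] + ' ' + nome, or 'ESTADO ' +
--     optionally D[EOA] + ' ' + nome, or taken whole."""
--     if no_esfera != "ESTADUAL":
--         return "", ""
--     s = no_orgao.strip().upper()
--     nome = s
--     if s.startswith("GOVERNO DO ESTADO "):
--         rest = s[18:]
--         if rest[:3] in ("DE ", "DO ", "DA "):
--             nome = rest[3:]
--     elif s.startswith("ESTADO "):
--         rest = s[7:]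
--         nome = rest[3:] if rest[:3] in ("DE ", "DO ", "DA ") else rest
--     return nome, _UF_MAP.get(nome, "")
-- ===== Notes on version B (the rewrite author's own statement) =====
-- stated objective: simpler
-- what changed: Replaces A's linear scan over seven literal prefixes by a factored two-branch test on the shared stems 'GOVERNO DO ESTADO ' / 'ESTADO ' followed by one optional 'DE '/'DO '/'DA ' strip.
import Mathlib
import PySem

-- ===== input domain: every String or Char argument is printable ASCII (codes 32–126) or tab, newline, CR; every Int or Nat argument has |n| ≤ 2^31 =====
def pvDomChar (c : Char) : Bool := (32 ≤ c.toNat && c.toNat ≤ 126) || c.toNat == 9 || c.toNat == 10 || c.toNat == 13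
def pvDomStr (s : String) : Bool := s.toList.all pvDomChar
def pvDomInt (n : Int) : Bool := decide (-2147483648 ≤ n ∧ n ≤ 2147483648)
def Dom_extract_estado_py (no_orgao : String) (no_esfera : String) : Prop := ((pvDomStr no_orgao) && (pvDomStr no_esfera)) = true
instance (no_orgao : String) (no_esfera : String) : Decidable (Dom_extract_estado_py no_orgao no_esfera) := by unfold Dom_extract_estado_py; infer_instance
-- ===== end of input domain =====

-- B replaces A's seven-prefix loop by a factored two-branch test on the shared stems
-- "GOVERNO DO ESTADO " / "ESTADO " with one optional "DE "/"DO "/"DA " strip (simpler).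

-- shared data: the _UF_MAP dict literal (used identically by both Pythons)
def ufMap : PySem.Dict String String := PySem.Dict.ofList [
  ("ACRE", "AC"), ("ALAGOAS", "AL"), ("AMAPA", "AP"), ("AMAZONAS", "AM"),
  ("BAHIA", "BA"), ("CEARA", "CE"), ("DISTRITO FEDERAL", "DF"),
  ("ESPIRITO SANTO", "ES"), ("GOIAS", "GO"), ("MARANHAO", "MA"),
  ("MATO GROSSO", "MT"), ("MATO GROSSO DO SUL", "MS"), ("MINAS GERAIS", "MG"),
  ("PARA", "PA"), ("PARAIBA", "PB"), ("PARANA", "PR"), ("PERNAMBUCO", "PE"),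
  ("PIAUI", "PI"), ("RIO DE JANEIRO", "RJ"), ("RIO GRANDE DO NORTE", "RN"),
  ("RIO GRANDE DO SUL", "RS"), ("RONDONIA", "RO"), ("RORAIMA", "RR"),
  ("SANTA CATARINA", "SC"), ("SAO PAULO", "SP"), ("SERGIPE", "SE"),
  ("TOCANTINS", "TO")]

-- ===== PORT A =====
-- the tuple of prefixes A loops over, in order
def prefixesA : List (List Char) :=
  ["ESTADO DE ".toList, "ESTADO DO ".toList, "ESTADO DA ".toList,
   "GOVERNO DO ESTADO DE ".toList, "GOVERNO DO ESTADO DO ".toList,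
   "GOVERNO DO ESTADO DA ".toList, "ESTADO ".toList]

-- A's for-loop: first matching prefix wins, nome = s[len(prefix):]; fallback s itself
def tryPrefixA : List (List Char) → List Char → List Char
  | [], s => s
  | p :: ps, s =>
      if PySem.Chars.startswith s p then PySem.List.slice s (some (p.length : Int)) none
      else tryPrefixA ps s

def extract_estado_py (no_orgao : String) (no_esfera : String) : String × String :=
  if no_esfera != "ESTADUAL" then ("", "")
  else
    let s := PySem.Chars.upper (PySem.Chars.strip no_orgao.toList)
    let nome := String.ofList (tryPrefixA prefixesA s)
    (nome, PySem.Dict.getD ufMap nome "")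

-- ===== PORT B =====
-- B's factored test: stem "GOVERNO DO ESTADO " (then a mandatory "DE "/"DO "/"DA ")
-- or stem "ESTADO " (then an optional "DE "/"DO "/"DA "), else the whole name
def stripPrefixB (s : List Char) : List Char :=
  if PySem.Chars.startswith s "GOVERNO DO ESTADO ".toList then
    let rest := PySem.List.slice s (some 18) none
    if PySem.List.slice rest none (some 3) ∈ ["DE ".toList, "DO ".toList, "DA ".toList] then
      PySem.List.slice rest (some 3) none
    else s
  else if PySem.Chars.startswith s "ESTADO ".toList then
    let rest := PySem.List.slice s (some 7) none
    if PySem.List.slice rest none (some 3) ∈ ["DE ".toList, "DO ".toList, "DA ".toList] then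
      PySem.List.slice rest (some 3) none
    else rest
  else s

def extract_estado_py_alt (no_orgao : String) (no_esfera : String) : String × String :=
  if no_esfera != "ESTADUAL" then ("", "")
  else
    let s := PySem.Chars.upper (PySem.Chars.strip no_orgao.toList)
    let nome := String.ofList (stripPrefixB s)
    (nome, PySem.Dict.getD ufMap nome "")

-- ===== PRECONDITION & SPEC =====
def Spec_extract_estado_py (no_orgao : String) (no_esfera : String) (out : String × String) : Prop := out = extract_estado_py_alt no_orgao no_esfera
instance (no_orgao : String) (no_esfera : String) (out : String × String) : Decidable (Spec_extract_estado_py no_orgao no_esfera out) := by unfold Spec_extract_estado_py; infer_instance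

-- ===== CLAIM (what is proved, stated in full; the proofs are below) =====
def Claim_equal_extract_estado_py : Prop := ∀ (no_orgao : String) (no_esfera : String), Dom_extract_estado_py no_orgao no_esfera → Spec_extract_estado_py no_orgao no_esfera (extract_estado_py no_orgao no_esfera)

-- ===== LEMMAS AND PROOFS =====

-- (p ++ q) is a prefix of t iff p is and q is a prefix of the remainder
theorem pv_prefix_append_iff {α : Type} (p q t : List α) :
    (p ++ q) <+: t ↔ p <+: t ∧ q <+: t.drop p.length := by
  constructor
  · rintro ⟨u, rfl⟩
    exact ⟨⟨q ++ u, by simp⟩, by simp⟩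
  · rintro ⟨⟨v, hv⟩, ⟨w, hw⟩⟩
    refine ⟨w, ?_⟩
    have hdrop : t.drop p.length = v := by
      subst hv; simp
    rw [hdrop] at hw
    subst hv; subst hw; simp

-- a length-3 prefix is exactly 'take 3 = it'
theorem pv_prefix3_iff (q t : List Char) (hq : q.length = 3) :
    q <+: t ↔ t.take 3 = q := by
  constructor
  · rintro ⟨u, rfl⟩
    rw [← hq, List.take_left]
  · intro h; exact h ▸ List.take_prefix 3 t

theorem core_eq (t : List Char) : tryPrefixA prefixesA t = stripPrefixB t := by
  have hsl : ∀ (r : List Char) (n : Nat), PySem.List.slice r (some (n : Int)) none = r.drop n := by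
    intro r n
    rw [PySem.List.slice_from r (by positivity)]; simp
  have htake : ∀ (r : List Char), PySem.List.slice r none (some 3) = r.take 3 := fun r => by
    rw [PySem.List.slice_to r (show (0:Int) ≤ 3 by norm_num)]; simp
  have hsl18i : PySem.List.slice t (some (18:Int)) none = t.drop 18 := by simpa using hsl t 18
  have hsl7i : PySem.List.slice t (some (7:Int)) none = t.drop 7 := by simpa using hsl t 7
  have hsl3i : ∀ (r : List Char), PySem.List.slice r (some (3:Int)) none = r.drop 3 :=
    fun r => by simpa using hsl r 3
  have hGiff : ∀ (d : List Char), d.length = 3 →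
      ((("GOVERNO DO ESTADO ".toList ++ d) <+: t) ↔ ("GOVERNO DO ESTADO ".toList <+: t ∧ (t.drop 18).take 3 = d)) := by
    intro d hd
    rw [pv_prefix_append_iff]
    constructor
    · rintro ⟨h1, h2⟩; exact ⟨h1, (pv_prefix3_iff d _ hd).mp (by simpa using h2)⟩
    · rintro ⟨h1, h2⟩; exact ⟨h1, by simpa using (pv_prefix3_iff d _ hd).mpr h2⟩
  have hEiff : ∀ (d : List Char), d.length = 3 →
      ((("ESTADO ".toList ++ d) <+: t) ↔ ("ESTADO ".toList <+: t ∧ (t.drop 7).take 3 = d)) := by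
    intro d hd
    rw [pv_prefix_append_iff]
    constructor
    · rintro ⟨h1, h2⟩; exact ⟨h1, (pv_prefix3_iff d _ hd).mp (by simpa using h2)⟩
    · rintro ⟨h1, h2⟩; exact ⟨h1, by simpa using (pv_prefix3_iff d _ hd).mpr h2⟩
  by_cases hG : "GOVERNO DO ESTADO ".toList <+: t
  · -- the GOVERNO stem: A's "ESTADO…" prefixes cannot also match (heads differ)
    have hne7 : ¬ "ESTADO ".toList <+: t := by
      intro h
      rcases List.prefix_or_prefix_of_prefix h hG with h' | h' <;> revert h' <;> decide
    have hneDE : ¬ "ESTADO DE ".toList <+: t := by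
      intro h
      rcases List.prefix_or_prefix_of_prefix h hG with h' | h' <;> revert h' <;> decide
    have hneDO : ¬ "ESTADO DO ".toList <+: t := by
      intro h
      rcases List.prefix_or_prefix_of_prefix h hG with h' | h' <;> revert h' <;> decide
    have hneDA : ¬ "ESTADO DA ".toList <+: t := by
      intro h
      rcases List.prefix_or_prefix_of_prefix h hG with h' | h' <;> revert h' <;> decide
    have h4iff : ("GOVERNO DO ESTADO DE ".toList <+: t) ↔ (t.drop 18).take 3 = ['D','E',' '] := by
      have h := hGiff "DE ".toList (by decide)
      constructor
      · intro hp
        have := (h.mp (by simpa using hp)).2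
        simpa using this
      · intro hq
        have := h.mpr ⟨hG, by simpa using hq⟩
        simpa using this
    have h5iff : ("GOVERNO DO ESTADO DO ".toList <+: t) ↔ (t.drop 18).take 3 = ['D','O',' '] := by
      have h := hGiff "DO ".toList (by decide)
      constructor
      · intro hp
        have := (h.mp (by simpa using hp)).2
        simpa using this
      · intro hq
        have := h.mpr ⟨hG, by simpa using hq⟩
        simpa using this
    have h6iff : ("GOVERNO DO ESTADO DA ".toList <+: t) ↔ (t.drop 18).take 3 = ['D','A',' '] := by
      have h := hGiff "DA ".toList (by decide)
      constructor
      · intro hp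
        have := (h.mp (by simpa using hp)).2
        simpa using this
      · intro hq
        have := h.mpr ⟨hG, by simpa using hq⟩
        simpa using this
    simp only [tryPrefixA, prefixesA, stripPrefixB, PySem.Chars.startswith_iff,
      hsl, htake, hsl18i, hsl3i]
    rw [if_neg hneDE, if_neg hneDO, if_neg hneDA, if_neg hne7, if_pos hG]
    by_cases hDE : (t.drop 18).take 3 = ['D','E',' ']
    · rw [if_pos (h4iff.mpr hDE), if_pos (by simp [hDE])]
      simp [List.drop_drop]
    · by_cases hDO : (t.drop 18).take 3 = ['D','O',' ']
      · rw [if_neg (fun h => hDE (h4iff.mp h)), if_pos (h5iff.mpr hDO), if_pos (by simp [hDO])]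
        simp [List.drop_drop]
      · by_cases hDA : (t.drop 18).take 3 = ['D','A',' ']
        · rw [if_neg (fun h => hDE (h4iff.mp h)), if_neg (fun h => hDO (h5iff.mp h)),
            if_pos (h6iff.mpr hDA), if_pos (by simp [hDA])]
          simp [List.drop_drop]
        · -- GOVERNO stem but no DE/DO/DA: A's loop falls through entirely
          rw [if_neg (fun h => hDE (h4iff.mp h)), if_neg (fun h => hDO (h5iff.mp h)),
            if_neg (fun h => hDA (h6iff.mp h)), if_neg (by simp [hDE, hDO, hDA])]
  · -- no GOVERNO stem: A's prefixes 4-6 cannot match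
    have hn456 : ∀ (d : List Char), ¬ ("GOVERNO DO ESTADO ".toList ++ d) <+: t := by
      intro d h
      exact hG ((pv_prefix_append_iff _ _ _).mp h).1
    have hn4 : ¬ "GOVERNO DO ESTADO DE ".toList <+: t := by
      intro h; exact hn456 "DE ".toList (by simpa using h)
    have hn5 : ¬ "GOVERNO DO ESTADO DO ".toList <+: t := by
      intro h; exact hn456 "DO ".toList (by simpa using h)
    have hn6 : ¬ "GOVERNO DO ESTADO DA ".toList <+: t := by
      intro h; exact hn456 "DA ".toList (by simpa using h)
    by_cases hE : "ESTADO ".toList <+: t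
    · have e1iff : ("ESTADO DE ".toList <+: t) ↔ (t.drop 7).take 3 = ['D','E',' '] := by
        have h := hEiff "DE ".toList (by decide)
        constructor
        · intro hp
          have := (h.mp (by simpa using hp)).2
          simpa using this
        · intro hq
          have := h.mpr ⟨hE, by simpa using hq⟩
          simpa using this
      have e2iff : ("ESTADO DO ".toList <+: t) ↔ (t.drop 7).take 3 = ['D','O',' '] := by
        have h := hEiff "DO ".toList (by decide)
        constructor
        · intro hp
          have := (h.mp (by simpa using hp)).2
          simpa using this
        · intro hq
          have := h.mpr ⟨hE, by simpa using hq⟩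
          simpa using this
      have e3iff : ("ESTADO DA ".toList <+: t) ↔ (t.drop 7).take 3 = ['D','A',' '] := by
        have h := hEiff "DA ".toList (by decide)
        constructor
        · intro hp
          have := (h.mp (by simpa using hp)).2
          simpa using this
        · intro hq
          have := h.mpr ⟨hE, by simpa using hq⟩
          simpa using this
      simp only [tryPrefixA, prefixesA, stripPrefixB, PySem.Chars.startswith_iff,
        hsl, htake, hsl7i, hsl3i]
      rw [if_neg hn4, if_neg hn5, if_neg hn6, if_neg hG, if_pos hE, if_pos hE]
      by_cases hDE : (t.drop 7).take 3 = ['D','E',' ']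
      · rw [if_pos (e1iff.mpr hDE), if_pos (by simp [hDE])]
        simp [List.drop_drop]
      · by_cases hDO : (t.drop 7).take 3 = ['D','O',' ']
        · rw [if_neg (fun h => hDE (e1iff.mp h)), if_pos (e2iff.mpr hDO), if_pos (by simp [hDO])]
          simp [List.drop_drop]
        · by_cases hDA : (t.drop 7).take 3 = ['D','A',' ']
          · rw [if_neg (fun h => hDE (e1iff.mp h)), if_neg (fun h => hDO (e2iff.mp h)),
              if_pos (e3iff.mpr hDA), if_pos (by simp [hDA])]
            simp [List.drop_drop]
          · -- bare "ESTADO " prefix, no DE/DO/DA behind it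
            rw [if_neg (fun h => hDE (e1iff.mp h)), if_neg (fun h => hDO (e2iff.mp h)),
              if_neg (fun h => hDA (e3iff.mp h)), if_neg (by simp [hDE, hDO, hDA])]
            simp
    · -- no prefix at all: both sides return t
      have hn1 : ¬ "ESTADO DE ".toList <+: t := fun h =>
        hE ((pv_prefix_append_iff "ESTADO ".toList "DE ".toList t).mp (by simpa using h)).1
      have hn2 : ¬ "ESTADO DO ".toList <+: t := fun h =>
        hE ((pv_prefix_append_iff "ESTADO ".toList "DO ".toList t).mp (by simpa using h)).1
      have hn3 : ¬ "ESTADO DA ".toList <+: t := fun h =>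
        hE ((pv_prefix_append_iff "ESTADO ".toList "DA ".toList t).mp (by simpa using h)).1
      simp only [tryPrefixA, prefixesA, stripPrefixB, PySem.Chars.startswith_iff]
      rw [if_neg hn1, if_neg hn2, if_neg hn3, if_neg hn4, if_neg hn5, if_neg hn6,
        if_neg hE, if_neg hG, if_neg hE]

-- ===== VERDICT (by name: the statement is the Claim_ definition above) =====
theorem extract_estado_py_spec : Claim_equal_extract_estado_py := by
  intro no_orgao no_esfera _
  unfold Spec_extract_estado_py extract_estado_py extract_estado_py_alt
  by_cases h : no_esfera != "ESTADUAL" <;> simp [h, core_eq]
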